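-- pv_equiv track=rewrite | github.com/seutje/DrupalBench | scripts/evaluate.py | ensure_diff_headers
-- ===== SOURCE A (Python) =====
-- def ensure_diff_headers(text):
--     if not text:
--         return text
--
--     def extract_marker_path(marker_line):
--         return marker_line[4:].strip().split('\t')[0].split(' ')[0]
--
--     def to_diff_token(path, default_prefix):
--         if path == "/dev/null":
--             return path
--         if path.startswith("a/") or path.startswith("b/"):
--             return path
--         return f"{default_prefix}/{path}"
--
--     lines = text.split('\n')
--     out = []
--     i = 0
--     while i < len(lines):
--         line = lines[i]
--         if line.startswith('--- ') and i + 1 < len(lines) and lines[i + 1].startswith('+++ '):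
--             has_diff_header = False
--             j = len(out) - 1
--             while j >= 0:
--                 prev = out[j].strip()
--                 if not prev:
--                     j -= 1
--                     continue
--                 has_diff_header = prev.startswith("diff --git ")
--                 break
--             if not has_diff_header:
--                 old_path = extract_marker_path(line)
--                 new_path = extract_marker_path(lines[i + 1])
--                 diff_old = to_diff_token(old_path, "a")
--                 diff_new = to_diff_token(new_path, "b")
--                 out.append(f"diff --git {diff_old} {diff_new}")
--             out.append(line)
--             out.append(lines[i + 1])
--             i += 2
--             continue
--         out.append(line)
--         i += 1
--
--     result = "\n".join(out).rstrip("\n")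
--     return result + "\n" if result else ""
-- ===== SOURCE B (Python) =====
-- def ensure_diff_headers(text):
--     if not text:
--         return text
--
--     def extract_marker_path(marker_line):
--         return marker_line[4:].strip().split('\t')[0].split(' ')[0]
--
--     def to_diff_token(path, default_prefix):
--         if path == "/dev/null":
--             return path
--         if path.startswith("a/") or path.startswith("b/"):
--             return path
--         return f"{default_prefix}/{path}"
--
--     out = []
--     last_nonblank = ''
--
--     def emit(line):
--         nonlocal last_nonblank
--         out.append(line)
--         s = line.strip()
--         if s:
--             last_nonblank = s
--
--     lines = text.split('\n')
--     i = 0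
--     n = len(lines)
--     while i < n:
--         line = lines[i]
--         if line.startswith('--- ') and i + 1 < n and lines[i + 1].startswith('+++ '):
--             if not last_nonblank.startswith("diff --git "):
--                 diff_old = to_diff_token(extract_marker_path(line), "a")
--                 diff_new = to_diff_token(extract_marker_path(lines[i + 1]), "b")
--                 emit(f"diff --git {diff_old} {diff_new}")
--             emit(line)
--             emit(lines[i + 1])
--             i += 2
--         else:
--             emit(line)
--             i += 1
--
--     result = "\n".join(out).rstrip("\n")
--     return result + "\n" if result else ""
-- ===== Notes on version B (the rewrite author's own statement) =====
-- stated objective: simpler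
-- what changed: The nested backward scan over the accumulated output at every marker pair is replaced by a single last-nonblank-line variable maintained on every append, making the function one pass.
import Mathlib
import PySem

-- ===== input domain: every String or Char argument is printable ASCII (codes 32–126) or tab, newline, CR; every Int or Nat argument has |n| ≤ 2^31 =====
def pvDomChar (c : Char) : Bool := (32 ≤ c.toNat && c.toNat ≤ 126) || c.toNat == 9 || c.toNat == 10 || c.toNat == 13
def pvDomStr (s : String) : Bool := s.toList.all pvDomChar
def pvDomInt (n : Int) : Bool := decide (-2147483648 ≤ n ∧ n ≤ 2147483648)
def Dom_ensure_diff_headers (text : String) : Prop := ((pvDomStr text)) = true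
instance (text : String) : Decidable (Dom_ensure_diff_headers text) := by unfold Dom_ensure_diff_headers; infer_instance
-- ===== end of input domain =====

-- B replaces A's backward rescan of the output at each old/new marker pair by a
-- last-nonblank-line variable maintained on every append (simpler, one pass).

-- ===== PORT A =====
-- shared helpers (identical code in both Pythons)
-- marker_line[4:].strip().split('\t')[0].split(' ')[0]; split with a non-empty
-- separator always returns a non-empty list in Python, so [0] is headD "" exactly.
def edhExtract (l : String) : String :=
  ((PySem.Str.split?
      (((PySem.Str.split? (PySem.Str.strip (PySem.Str.slice l (some 4) none)) "\t").getD []).headD "")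
      " ").getD []).headD ""

def edhToken (path pref : String) : String :=
  if path = "/dev/null" then path
  else if PySem.Str.startswith path "a/" || PySem.Str.startswith path "b/" then path
  else pref ++ "/" ++ path

def edhHeader (line next : String) : String :=
  "diff --git " ++ edhToken (edhExtract line) "a" ++ " " ++ edhToken (edhExtract next) "b"

-- s.rstrip("\n"): drop trailing '\n' characters (exact, hand-ported)
def edhRstripNl (s : String) : String :=
  String.ofList ((s.toList.reverse.dropWhile (· == '\n')).reverse)

def edhFinish (out : List String) : String :=
  let result := edhRstripNl (PySem.Str.join "\n" out)
  if result ≠ "" then result ++ "\n" else ""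

-- A's inner `while j >= 0` backward scan, as recursion over out.reverse
def edhScanA : List String → Bool
  | [] => false
  | p :: r =>
    if PySem.Str.strip p = "" then edhScanA r
    else PySem.Str.startswith (PySem.Str.strip p) "diff --git "

def edhLoopA : List String → List String → List String
  | out, [] => out
  | out, [line] => edhLoopA (out ++ [line]) []
  | out, line :: next :: rest =>
    if PySem.Str.startswith line "--- " && PySem.Str.startswith next "+++ " then
      let out' := if !(edhScanA out.reverse) then out ++ [edhHeader line next] else out
      edhLoopA (out' ++ [line, next]) rest
    else edhLoopA (out ++ [line]) (next :: rest)

def ensure_diff_headers (text : String) : String :=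
  if text = "" then text
  else edhFinish (edhLoopA [] ((PySem.Str.split? text "\n").getD []))

-- ===== PORT B =====
-- emit's tracker update: last_nonblank := line.strip() when non-blank
def edhUpd (lnb line : String) : String :=
  if PySem.Str.strip line = "" then lnb else PySem.Str.strip line

def edhLoopB : List String → String → List String → List String
  | out, _, [] => out
  | out, lnb, [line] => edhLoopB (out ++ [line]) (edhUpd lnb line) []
  | out, lnb, line :: next :: rest =>
    if PySem.Str.startswith line "--- " && PySem.Str.startswith next "+++ " then
      if !(PySem.Str.startswith lnb "diff --git ") then
        let h := edhHeader line next
        edhLoopB (out ++ [h, line, next]) (edhUpd (edhUpd (edhUpd lnb h) line) next) rest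
      else
        edhLoopB (out ++ [line, next]) (edhUpd (edhUpd lnb line) next) rest
    else edhLoopB (out ++ [line]) (edhUpd lnb line) (next :: rest)

def ensure_diff_headers_alt (text : String) : String :=
  if text = "" then text
  else edhFinish (edhLoopB [] "" ((PySem.Str.split? text "\n").getD []))

-- ===== PRECONDITION & SPEC =====
def Spec_ensure_diff_headers (text : String) (out : String) : Prop := out = ensure_diff_headers_alt text
instance (text : String) (out : String) : Decidable (Spec_ensure_diff_headers text out) := by unfold Spec_ensure_diff_headers; infer_instance

-- ===== CLAIM (what is proved, stated in full; the proofs are below) =====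
def Claim_equal_ensure_diff_headers : Prop := ∀ (text : String), Dom_ensure_diff_headers text → Spec_ensure_diff_headers text (ensure_diff_headers text)

-- ===== LEMMAS AND PROOFS =====

-- the last non-blank stripped line of out, reading out.reverse
def edhLNB : List String → String
  | [] => ""
  | p :: r => if PySem.Str.strip p = "" then edhLNB r else PySem.Str.strip p

theorem edhScanA_eq (r : List String) :
    edhScanA r = PySem.Str.startswith (edhLNB r) "diff --git " := by
  induction r with
  | nil => simp [edhScanA, edhLNB]; decide
  | cons p r ih =>
    simp only [edhScanA, edhLNB]
    split <;> simp [ih]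

theorem edhLNB_append (out : List String) (l : String) :
    edhLNB ((out ++ [l]).reverse) = edhUpd (edhLNB out.reverse) l := by
  simp [List.reverse_append, edhLNB, edhUpd]

theorem edhLoop_eq_aux (n : Nat) :
    ∀ rest : List String, rest.length ≤ n →
      ∀ out lnb, lnb = edhLNB out.reverse → edhLoopA out rest = edhLoopB out lnb rest := by
  induction n with
  | zero =>
    intro rest hlen out lnb _
    match rest, hlen with
    | [], _ => rfl
  | succ n ih =>
    intro rest hlen out lnb h
    match rest, hlen with
    | [], _ => rfl
    | [line], hlen =>
      rw [edhLoopA, edhLoopB, ih [] (by simp) (out ++ [line]) (edhUpd lnb line)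
        (by rw [h, edhLNB_append])]
    | line :: next :: rest, hlen =>
      rw [edhLoopA, edhLoopB]
      by_cases hc : (PySem.Str.startswith line "--- " && PySem.Str.startswith next "+++ ") = true
      · simp only [hc, if_true]
        rw [edhScanA_eq, ← h]
        by_cases hs : PySem.Str.startswith lnb "diff --git " = true
        · simp only [hs, Bool.not_true, Bool.false_eq_true, if_false]
          have e : out ++ [line, next] = (out ++ [line]) ++ [next] := by simp
          rw [e]
          exact ih rest (by simp at hlen ⊢; omega) _ _
            (by rw [edhLNB_append, edhLNB_append, h])
        · simp only [Bool.not_eq_true] at hs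
          simp only [hs, Bool.not_false, if_true]
          have e : (out ++ [edhHeader line next]) ++ [line, next]
               = ((out ++ [edhHeader line next, line]) ++ [next]) := by simp
          have e2 : out ++ [edhHeader line next, line, next]
               = ((out ++ [edhHeader line next, line]) ++ [next]) := by simp
          have e3 : out ++ [edhHeader line next, line]
               = ((out ++ [edhHeader line next]) ++ [line]) := by simp
          rw [e, e2]
          exact ih rest (by simp at hlen ⊢; omega) _ _
            (by rw [edhLNB_append, e3, edhLNB_append, edhLNB_append, h])
      · simp only [Bool.not_eq_true] at hc
        simp only [hc, Bool.false_eq_true, if_false]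
        exact ih (next :: rest) (by simp at hlen ⊢; omega) (out ++ [line]) (edhUpd lnb line)
          (by rw [h, edhLNB_append])

theorem edhLoop_eq (rest : List String) :
    ∀ out lnb, lnb = edhLNB out.reverse → edhLoopA out rest = edhLoopB out lnb rest :=
  edhLoop_eq_aux rest.length rest le_rfl

-- ===== VERDICT (by name: the statement is the Claim_ definition above) =====
theorem ensure_diff_headers_spec : Claim_equal_ensure_diff_headers := by
  intro text _
  unfold Spec_ensure_diff_headers ensure_diff_headers ensure_diff_headers_alt
  split
  · rfl
  · rw [edhLoop_eq _ [] "" rfl]
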